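-- pv_equiv track=rewrite | github.com/huikinglam02gmail/Leetcode_solutions | 2002.maximum-product-of-the-length-of-two-palindromic-subsequences.py | setBits
-- ===== SOURCE A (Python) =====
-- def setBits(num1, num2):
--     result = set()
--     temp = num1
--     while temp > 0:
--         if temp <= num2:
--             result.add(temp)
--         temp -= 1
--         temp &= num1
--     return result
-- ===== SOURCE B (Python) =====
-- def setBits(num1, num2):
--     # Divide and conquer on the highest set bit: the positive submasks of
--     # n = h + r (h the highest power of two in n) in decreasing order are
--     # the submasks of r each raised by h, then h itself, then the submasks of r.
--     def submasks(n):
--         if n <= 0: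
--             return []
--         h = 1
--         while h * 2 <= n:
--             h *= 2
--         rest = submasks(n - h)
--         return [h + s for s in rest] + [h] + rest
--     return {s for s in submasks(num1) if s <= num2}
-- ===== Notes on version B (the rewrite author's own statement) =====
-- stated objective: alternative
-- what changed: A walks the classic submask chain temp = (temp-1) & num1; B never touches bitwise-AND iteration and instead builds the list of positive submasks by divide and conquer on the highest set bit (submasks(h+r) = [h+s for s in submasks(r)] + [h] + submasks(r)), then filters by <= num2 into a set.
import Mathlib
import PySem

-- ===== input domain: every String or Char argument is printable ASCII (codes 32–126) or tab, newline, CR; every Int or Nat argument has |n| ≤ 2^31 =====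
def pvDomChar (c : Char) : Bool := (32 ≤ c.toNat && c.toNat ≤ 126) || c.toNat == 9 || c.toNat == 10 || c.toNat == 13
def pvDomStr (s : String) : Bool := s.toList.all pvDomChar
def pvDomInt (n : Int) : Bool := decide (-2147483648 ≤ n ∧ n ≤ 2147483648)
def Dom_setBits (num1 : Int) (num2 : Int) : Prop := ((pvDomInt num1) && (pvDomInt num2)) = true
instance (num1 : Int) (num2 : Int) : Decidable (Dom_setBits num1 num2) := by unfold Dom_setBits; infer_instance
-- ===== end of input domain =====

-- B replaces A's submask-chain iteration (temp = (temp-1) & num1) by a divide-and-conquer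
-- on the highest set bit that lists the submasks directly; same result, alternative algorithm.

-- ===== PORT A =====
-- termination fact for A's loop: Python's 'a & b' never exceeds a nonnegative a
theorem pyBandLeLeft (a b : Int) (ha : 0 ≤ a) : PySem.Int.band a b ≤ a := by
  unfold PySem.Int.band
  have h1 : a.toNat &&& b.toNat ≤ a.toNat := Nat.and_le_left
  have h2 : a.toNat - (a.toNat &&& (-b - 1).toNat) ≤ a.toNat := Nat.sub_le _ _
  split_ifs <;> omega

def setBitsLoop (num1 num2 temp : Int) (result : PySem.Set Int) : PySem.Set Int :=
  if h : 0 < temp then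
    setBitsLoop num1 num2 (PySem.Int.band (temp - 1) num1)
      (if temp ≤ num2 then PySem.Set.add result temp else result)
  else result
termination_by temp.toNat
decreasing_by
  have := pyBandLeLeft (temp - 1) num1 (by omega)
  omega

def setBits (num1 : Int) (num2 : Int) : List Int :=
  setBitsLoop num1 num2 num1 PySem.Set.empty

-- ===== PORT B =====
-- 'h = 1; while h * 2 <= n: h *= 2' (fuel only makes the Lean recursion total)
def powLoop (fuel : Nat) (n h : Int) : Int :=
  match fuel with
  | 0 => h
  | fuel + 1 => if h * 2 ≤ n then powLoop fuel n (h * 2) else h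

-- termination fact for submasksB: the computed h stays in [1, n]
theorem powLoop_bounds (fuel : Nat) (n : Int) : ∀ h : Int, 1 ≤ h → h ≤ n →
    1 ≤ powLoop fuel n h ∧ powLoop fuel n h ≤ n := by
  induction fuel with
  | zero => intro h h1 h2; exact ⟨h1, h2⟩
  | succ fuel ih =>
    intro h h1 h2
    by_cases hc : h * 2 ≤ n
    · simpa [powLoop, hc] using ih (h * 2) (by omega) (by omega)
    · simpa [powLoop, hc] using ⟨h1, h2⟩

def submasksB (n : Int) : List Int :=
  if _hn : n ≤ 0 then []
  else
    let hb := powLoop n.toNat n 1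
    let rest := submasksB (n - hb)
    rest.map (fun s => hb + s) ++ hb :: rest
termination_by n.toNat
decreasing_by
  have := powLoop_bounds n.toNat n 1 (by omega) (by omega)
  omega

def setBits_alt (num1 : Int) (num2 : Int) : List Int :=
  PySem.Set.ofList ((submasksB num1).filter (fun s => decide (s ≤ num2)))

-- ===== PRECONDITION & SPEC =====
def Spec_setBits (num1 : Int) (num2 : Int) (out : List Int) : Prop := out = setBits_alt num1 num2
instance (num1 : Int) (num2 : Int) (out : List Int) : Decidable (Spec_setBits num1 num2 out) := by unfold Spec_setBits; infer_instance

-- ===== CLAIM (what is proved, stated in full; the proofs are below) =====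
def Claim_equal_setBits : Prop := ∀ (num1 : Int) (num2 : Int), Dom_setBits num1 num2 → Spec_setBits num1 num2 (setBits num1 num2)

-- ===== LEMMAS AND PROOFS =====

-- Nat model of A's loop: the visited values
def chainN (n t : Nat) : List Nat :=
  if h : 0 < t then t :: chainN n ((t - 1) &&& n) else []
termination_by t
decreasing_by
  have : (t - 1) &&& n ≤ t - 1 := Nat.and_le_left
  omega

-- Nat model of B's recursion
def subsN (n : Nat) : List Nat :=
  if h : 0 < n then
    (subsN (n - 2 ^ n.log2)).map (fun s => 2 ^ n.log2 + s) ++ 2 ^ n.log2 :: subsN (n - 2 ^ n.log2)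
  else []
termination_by n
decreasing_by
  have h1 : 2 ^ n.log2 ≤ n := Nat.log2_self_le (by omega)
  have h2 : 0 < 2 ^ n.log2 := Nat.two_pow_pos _
  omega

theorem chainN_pos (n t : Nat) (h : 0 < t) : chainN n t = t :: chainN n ((t - 1) &&& n) := by
  rw [chainN]; simp [h]

theorem chainN_nil (n t : Nat) (h : ¬ 0 < t) : chainN n t = [] := by
  rw [chainN]; simp [h]

theorem subsN_pos (n : Nat) (h : 0 < n) :
    subsN n = (subsN (n - 2 ^ n.log2)).map (fun s => 2 ^ n.log2 + s)
      ++ 2 ^ n.log2 :: subsN (n - 2 ^ n.log2) := by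
  rw [subsN]; simp [h]

theorem subsN_zero : subsN 0 = [] := by
  rw [subsN]; simp

theorem tb_add {p r : Nat} (hr : r < 2 ^ p) (i : Nat) :
    (2 ^ p + r).testBit i = (if i = p then true else if i < p then r.testBit i else false) := by
  rcases lt_trichotomy i p with h | h | h
  · have h1 : (2 ^ p + r) % 2 ^ p = r := by rw [Nat.add_mod_left, Nat.mod_eq_of_lt hr]
    have h2 := Nat.testBit_mod_two_pow (2 ^ p + r) p i
    rw [h1] at h2
    simp only [h, decide_true, Bool.true_and] at h2
    simp [Nat.ne_of_lt h, h, h2.symm]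
  · subst h
    rw [Nat.testBit_two_pow_add_eq, Nat.testBit_lt_two_pow hr]
    simp
  · have hb : 2 ^ p + r < 2 ^ i := by
      calc 2 ^ p + r < 2 ^ p + 2 ^ p := by omega
      _ = 2 ^ (p + 1) := by ring
      _ ≤ 2 ^ i := Nat.pow_le_pow_right (by omega) (by omega)
    simp [Nat.testBit_lt_two_pow hb, Nat.ne_of_gt h, Nat.lt_asymm h]

theorem testBit_false_of_lt {x p i : Nat} (hx : x < 2 ^ p) (hi : p ≤ i) : x.testBit i = false :=
  Nat.testBit_lt_two_pow (lt_of_lt_of_le hx (Nat.pow_le_pow_right (by omega) hi))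

theorem land_add_pow {p r x : Nat} (hr : r < 2 ^ p) (hx : x < 2 ^ p) :
    x &&& (2 ^ p + r) = x &&& r :=
  Nat.eq_of_testBit_eq fun i => by
    rw [Nat.testBit_land, Nat.testBit_land, tb_add hr]
    by_cases h1 : i = p
    · subst h1; simp [testBit_false_of_lt hx le_rfl]
    · by_cases h2 : i < p
      · simp [h1, h2]
      · have hx' : x.testBit i = false := testBit_false_of_lt hx (Nat.le_of_not_lt h2)
        simp [h1, h2, hx']

theorem addpow_land_addpow {p r y : Nat} (hr : r < 2 ^ p) (hy : y < 2 ^ p) :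
    (2 ^ p + y) &&& (2 ^ p + r) = 2 ^ p + (y &&& r) :=
  Nat.eq_of_testBit_eq fun i => by
    have hyr : y &&& r < 2 ^ p := lt_of_le_of_lt Nat.and_le_left hy
    rw [Nat.testBit_land, tb_add hr, tb_add hy, tb_add hyr]
    by_cases h1 : i = p
    · simp [h1]
    · by_cases h2 : i < p
      · simp [h1, h2]
      · simp [h1, h2]

theorem powsub1_land {p r : Nat} (hr : r < 2 ^ p) : (2 ^ p - 1) &&& (2 ^ p + r) = r :=
  Nat.eq_of_testBit_eq fun i => by
    rw [Nat.testBit_land, Nat.testBit_two_pow_sub_one, tb_add hr]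
    by_cases h1 : i = p
    · have hr' : r.testBit p = false := testBit_false_of_lt hr le_rfl
      simp [h1, hr']
    · by_cases h2 : i < p
      · simp [h1, h2]
      · have hr' : r.testBit i = false := testBit_false_of_lt hr (Nat.le_of_not_lt h2)
        simp [h1, h2, hr']

theorem chainN_high (p r : Nat) (hr : r < 2 ^ p) :
    ∀ t, t < 2 ^ p → chainN (2 ^ p + r) t = chainN r t := by
  intro t
  induction t using Nat.strong_induction_on with
  | _ t ih =>
    intro ht
    by_cases h0 : 0 < t
    · have hnext : (t - 1) &&& (2 ^ p + r) = (t - 1) &&& r := land_add_pow hr (by omega)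
      have hlt : (t - 1) &&& r < t := lt_of_le_of_lt Nat.and_le_left (by omega)
      rw [chainN_pos _ _ h0, chainN_pos _ _ h0, hnext, ih _ hlt (by omega : (t - 1) &&& r < 2 ^ p)]
    · rw [chainN_nil _ _ h0, chainN_nil _ _ h0]

theorem chainN_step (p r : Nat) (hr : r < 2 ^ p) :
    ∀ s, s &&& r = s →
      chainN (2 ^ p + r) (2 ^ p + s) = (chainN r s).map (fun x => 2 ^ p + x) ++ 2 ^ p :: chainN r r := by
  intro s
  induction s using Nat.strong_induction_on with
  | _ s ih =>
    intro hs
    have hp : 0 < 2 ^ p := Nat.two_pow_pos _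
    have hsr : s ≤ r := hs ▸ Nat.and_le_right
    by_cases h0 : 0 < s
    · rw [chainN_pos _ _ (by omega : 0 < 2 ^ p + s)]
      have he : 2 ^ p + s - 1 = 2 ^ p + (s - 1) := by omega
      rw [he, addpow_land_addpow hr (by omega : s - 1 < 2 ^ p)]
      have hidem : ((s - 1) &&& r) &&& r = (s - 1) &&& r := by
        rw [Nat.and_assoc, Nat.and_self]
      have hlt : (s - 1) &&& r < s := lt_of_le_of_lt Nat.and_le_left (by omega)
      rw [ih _ hlt hidem, chainN_pos r s h0]
      simp
    · have hs0 : s = 0 := by omega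
      subst hs0
      rw [Nat.add_zero, chainN_pos _ _ hp]
      rw [show 2 ^ p - 1 &&& (2 ^ p + r) = r from powsub1_land hr]
      rw [chainN_high p r hr r hr, chainN_nil r 0 (by omega)]
      simp

theorem chainN_eq_subsN : ∀ n, chainN n n = subsN n := by
  intro n
  induction n using Nat.strong_induction_on with
  | _ n ih =>
    by_cases h0 : 0 < n
    · have hne : n ≠ 0 := by omega
      have h1 : 2 ^ n.log2 ≤ n := Nat.log2_self_le hne
      have h2 : n < 2 ^ (n.log2 + 1) := (Nat.log2_lt hne).mp (Nat.lt_succ_self _)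
      have hr : n - 2 ^ n.log2 < 2 ^ n.log2 := by
        rw [pow_succ] at h2; omega
      have hn : n = 2 ^ n.log2 + (n - 2 ^ n.log2) := by omega
      calc chainN n n = chainN (2 ^ n.log2 + (n - 2 ^ n.log2)) (2 ^ n.log2 + (n - 2 ^ n.log2)) := by
              rw [← hn]
        _ = (chainN (n - 2 ^ n.log2) (n - 2 ^ n.log2)).map (fun x => 2 ^ n.log2 + x)
              ++ 2 ^ n.log2 :: chainN (n - 2 ^ n.log2) (n - 2 ^ n.log2) :=
              chainN_step _ _ hr _ (Nat.and_self _)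
        _ = subsN n := by
              rw [ih (n - 2 ^ n.log2) (by omega), subsN_pos n h0]
    · have : n = 0 := by omega
      subst this
      rw [chainN_nil _ _ (by omega), subsN_zero]

-- A's loop folds Set.add over the (filtered) chain
theorem loopA_eq (num2 : Int) (n : Nat) : ∀ (t : Nat) (acc : PySem.Set Int),
    setBitsLoop (↑n) num2 (↑t) acc =
      List.foldl PySem.Set.add acc
        (((chainN n t).map (fun x : Nat => (x : Int))).filter (fun s => decide (s ≤ num2))) := by
  intro t
  induction t using Nat.strong_induction_on with
  | _ t ih =>
    intro acc
    by_cases h0 : 0 < t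
    · have hpos : (0 : Int) < ↑t := by exact_mod_cast h0
      rw [setBitsLoop]
      simp only [dif_pos hpos]
      have hband : PySem.Int.band ((t : Int) - 1) ↑n = (((t - 1) &&& n : Nat) : Int) := by
        rw [show ((t : Int) - 1) = (((t - 1 : Nat)) : Int) from by omega, PySem.Int.band_natCast]
      rw [hband]
      have hlt : (t - 1) &&& n < t := lt_of_le_of_lt Nat.and_le_left (by omega)
      rw [ih _ hlt, chainN_pos n t h0]
      by_cases hle : (t : Int) ≤ num2
      · simp [hle]
      · simp [hle]
    · rw [setBitsLoop]
      have hneg : ¬ (0 : Int) < ↑t := by exact_mod_cast h0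
      simp only [dif_neg hneg]
      rw [chainN_nil n t h0]
      simp

theorem powLoop_eq (fuel : Nat) : ∀ (j : Nat) (n : Nat), 0 < n → 2 ^ j ≤ n → n < 2 ^ (j + fuel) →
    powLoop fuel (↑n) (↑(2 ^ j : Nat)) = ((2 ^ n.log2 : Nat) : Int) := by
  induction fuel with
  | zero =>
    intro j n h1 h2 h3
    rw [Nat.add_zero] at h3
    exact absurd h2 (by omega)
  | succ fuel ih =>
    intro j n h1 h2 h3
    by_cases hc : 2 ^ (j + 1) ≤ n
    · have hc' : 2 ^ j * 2 ≤ n := by rwa [← pow_succ]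
      rw [powLoop]
      simp only [if_pos (show ((2 ^ j : Nat) : Int) * 2 ≤ ↑n from by exact_mod_cast hc')]
      rw [show ((2 ^ j : Nat) : Int) * 2 = ((2 ^ (j + 1) : Nat) : Int) from by push_cast [pow_succ]; ring]
      exact ih (j + 1) n h1 hc (by rwa [show j + 1 + fuel = j + (fuel + 1) from by omega])
    · have hc' : ¬ 2 ^ j * 2 ≤ n := by rwa [← pow_succ]
      rw [powLoop]
      simp only [if_neg (show ¬ ((2 ^ j : Nat) : Int) * 2 ≤ ↑n from by exact_mod_cast hc')]
      have hj : n.log2 = j := by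
        have ha : j ≤ n.log2 := (Nat.le_log2 (by omega)).mpr h2
        have hb : n.log2 < j + 1 := (Nat.log2_lt (by omega)).mpr (by omega)
        omega
      rw [hj]

theorem map_cast_add (k : Nat) (l : List Nat) :
    (List.map (fun x : Nat => (x : Int)) l).map (fun s => ((k : Nat) : Int) + s) =
      List.map (fun x : Nat => (x : Int)) (l.map (fun s => k + s)) := by
  induction l with
  | nil => rfl
  | cons a l ih => simp [ih]

theorem submasksB_eq : ∀ n : Nat, submasksB ↑n = List.map (fun x : Nat => (x : Int)) (subsN n) := by
  intro n
  induction n using Nat.strong_induction_on with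
  | _ n ih =>
    by_cases h0 : 0 < n
    · rw [submasksB]
      have hng : ¬ ((n : Int) ≤ 0) := by exact_mod_cast Nat.not_le.mpr h0
      simp only [dif_neg hng]
      have hfuel : n < 2 ^ (0 + ((n : Int)).toNat) := by
        simpa using Nat.lt_two_pow_self
      have hp : powLoop ((n : Int)).toNat ↑n 1 = ((2 ^ n.log2 : Nat) : Int) := by
        have := powLoop_eq ((n : Int)).toNat 0 n h0 (by simpa using h0) hfuel
        simpa using this
      rw [hp]
      have hle : 2 ^ n.log2 ≤ n := Nat.log2_self_le (by omega)
      rw [show ((n : Int) - ((2 ^ n.log2 : Nat) : Int)) = ((n - 2 ^ n.log2 : Nat) : Int) from by omega]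
      rw [ih (n - 2 ^ n.log2) (by have : 0 < 2 ^ n.log2 := Nat.two_pow_pos _; omega)]
      rw [subsN_pos n h0, List.map_append, List.map_cons,
        map_cast_add (2 ^ n.log2) (subsN (n - 2 ^ n.log2))]
    · have : n = 0 := by omega
      subst this
      rw [submasksB, subsN_zero]
      simp

-- ===== VERDICT (by name: the statement is the Claim_ definition above) =====
theorem setBits_spec : Claim_equal_setBits := by
  intro num1 num2 _
  unfold Spec_setBits
  by_cases h : 0 < num1
  · obtain ⟨n, rfl⟩ : ∃ n : Nat, num1 = ↑n := ⟨num1.toNat, (Int.toNat_of_nonneg (by omega)).symm⟩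
    unfold setBits setBits_alt
    rw [loopA_eq, submasksB_eq, chainN_eq_subsN, PySem.Set.ofList_eq_foldl]
    rfl
  · unfold setBits setBits_alt
    rw [setBitsLoop]
    simp only [dif_neg h]
    rw [submasksB]
    simp only [dif_pos (show num1 ≤ 0 from by omega)]
    rfl
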